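-- pv_equiv track=rewrite | github.com/yonglanws/astrbot_plugin_pjsk_guess_jacket | main.py | _contains_significant_substring
-- ===== SOURCE A (Python) =====
-- def _contains_significant_substring(s1: str, s2: str) -> bool:
--     """
--     检查是否包含有意义的子串
--     """
--     min_len = min(len(s1), len(s2))
--     check_len = max(3, int(min_len * 0.5))
--
--     for i in range(len(s1) - check_len + 1):
--         substr = s1[i:i + check_len]
--         if substr in s2:
--             return True
--
--     for i in range(len(s2) - check_len + 1):
--         substr = s2[i:i + check_len]
--         if substr in s1:
--             return True
--
--     return False
-- ===== SOURCE B (Python) =====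
-- def _contains_significant_substring(s1: str, s2: str) -> bool:
--     L = max(3, min(len(s1), len(s2)) // 2)
--     subs = {s1[i:i + L] for i in range(len(s1) - L + 1)}
--     return any(s2[i:i + L] in subs for i in range(len(s2) - L + 1))
-- ===== Notes on version B (the rewrite author's own statement) =====
-- stated objective: faster
-- what changed: B builds a hash set of the length-L substrings of s1 once and scans s2 a single time against it, replacing A's two nested substring-search loops (and A's entirely redundant second loop).
import Mathlib
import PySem

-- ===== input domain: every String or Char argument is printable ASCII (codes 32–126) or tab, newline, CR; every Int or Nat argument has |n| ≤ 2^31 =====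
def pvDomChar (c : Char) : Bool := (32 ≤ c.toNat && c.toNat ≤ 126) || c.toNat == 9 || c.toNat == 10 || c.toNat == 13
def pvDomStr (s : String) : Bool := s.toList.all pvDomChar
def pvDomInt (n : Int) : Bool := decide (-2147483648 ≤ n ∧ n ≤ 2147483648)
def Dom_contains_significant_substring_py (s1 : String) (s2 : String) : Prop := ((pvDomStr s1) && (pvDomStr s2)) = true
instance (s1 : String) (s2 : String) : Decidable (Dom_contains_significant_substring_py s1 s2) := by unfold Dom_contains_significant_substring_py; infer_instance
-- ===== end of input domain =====

-- B replaces A's two quadratic substring-search loops by one hash-set of s1's length-L windows and a single scan of s2 (objective: faster).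

-- ===== PORT A =====
-- one 'for i in range(len(s)-check_len+1): if s[i:i+check_len] in big: return True' loop of A
def pvScanA (s big : List Char) (L : Nat) : Bool :=
  (PySem.List.pyRange 0 ((s.length : Int) - (L : Int) + 1) 1).any
    (fun i => PySem.Chars.isIn (PySem.Chars.slice s (some i) (some (i + (L : Int)))) big)

def contains_significant_substring_py (s1 : String) (s2 : String) : Bool :=
  let a := s1.toList
  let b := s2.toList
  -- int(min_len * 0.5) = min_len // 2 exactly (min_len is a nonnegative length far below 2^53)
  let checkLen : Nat := max 3 (min a.length b.length / 2)
  pvScanA a b checkLen || pvScanA b a checkLen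

-- ===== PORT B =====
def contains_significant_substring_py_alt (s1 : String) (s2 : String) : Bool :=
  let a := s1.toList
  let b := s2.toList
  let L : Nat := max 3 (min a.length b.length / 2)
  let subs : PySem.Set (List Char) :=
    PySem.Set.ofList ((PySem.List.pyRange 0 ((a.length : Int) - (L : Int) + 1) 1).map
      (fun i => PySem.Chars.slice a (some i) (some (i + (L : Int)))))
  (PySem.List.pyRange 0 ((b.length : Int) - (L : Int) + 1) 1).any
    (fun i => PySem.Set.contains subs (PySem.Chars.slice b (some i) (some (i + (L : Int)))))

-- ===== PRECONDITION & SPEC =====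
def Spec_contains_significant_substring_py (s1 : String) (s2 : String) (out : Bool) : Prop := out = contains_significant_substring_py_alt s1 s2
instance (s1 : String) (s2 : String) (out : Bool) : Decidable (Spec_contains_significant_substring_py s1 s2 out) := by unfold Spec_contains_significant_substring_py; infer_instance

-- ===== CLAIM (what is proved, stated in full; the proofs are below) =====
def Claim_equal_contains_significant_substring_py : Prop := ∀ (s1 : String) (s2 : String), Dom_contains_significant_substring_py s1 s2 → Spec_contains_significant_substring_py s1 s2 (contains_significant_substring_py s1 s2)

-- ===== LEMMAS AND PROOFS =====

-- "there is a common window of length L"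
def pvCommon (a b : List Char) (L : Nat) : Prop :=
  ∃ i j : Nat, i + L ≤ a.length ∧ j + L ≤ b.length ∧ (a.drop i).take L = (b.drop j).take L

lemma pvSlice_eval (s : List Char) (i : Int) (hi : 0 ≤ i) (L : Nat) :
    PySem.Chars.slice s (some i) (some (i + (L : Int))) = (s.drop i.toNat).take L := by
  rw [PySem.Chars.slice_eq_listSlice, PySem.List.slice_toNat s hi (by omega)]
  congr 1
  omega

lemma pvAny_range (n : Int) (f : Int → Bool) :
    ((PySem.List.pyRange 0 n 1).any f = true) ↔ ∃ k : Nat, (k : Int) < n ∧ f (k : Int) = true := by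
  rw [List.any_eq_true]
  constructor
  · rintro ⟨i, hmem, hf⟩
    rw [PySem.List.mem_pyRange_one] at hmem
    exact ⟨i.toNat, by omega, by rwa [Int.toNat_of_nonneg hmem.1]⟩
  · rintro ⟨k, hk, hf⟩
    exact ⟨(k : Int), by rw [PySem.List.mem_pyRange_one]; omega, hf⟩

lemma pvPrefix_window (sub t : List Char) (L : Nat) (hlen : sub.length = L) :
    (sub <+: t) ↔ L ≤ t.length ∧ t.take L = sub := by
  constructor
  · intro h
    have hle : sub.length ≤ t.length := h.length_le
    have := List.prefix_iff_eq_take.mp h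
    exact ⟨by omega, by rw [← hlen, ← this]⟩
  · rintro ⟨hle, heq⟩
    rw [List.prefix_iff_eq_take, hlen, heq]

lemma pvInfix_iff (sub b : List Char) (L : Nat) (hL : 0 < L) (hlen : sub.length = L) :
    (sub <:+: b) ↔ ∃ j : Nat, j + L ≤ b.length ∧ (b.drop j).take L = sub := by
  rw [← PySem.Chars.isIn_iff_infix, ← PySem.Chars.exists_prefix_drop_iff_isIn]
  constructor
  · rintro ⟨j, hpre⟩
    rw [pvPrefix_window sub _ L hlen] at hpre
    have hdl : (b.drop j).length = b.length - j := by simp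
    refine ⟨j, by omega, hpre.2⟩
  · rintro ⟨j, hj, heq⟩
    refine ⟨j, (pvPrefix_window sub _ L hlen).mpr ⟨by simp; omega, heq⟩⟩

lemma pvWindow_len (s : List Char) (i L : Nat) (h : i + L ≤ s.length) :
    ((s.drop i).take L).length = L := by simp; omega

lemma pvScanA_iff (s big : List Char) (L : Nat) (hL : 0 < L) :
    pvScanA s big L = true ↔ pvCommon s big L := by
  unfold pvScanA pvCommon
  rw [pvAny_range]
  constructor
  · rintro ⟨i, hi, hf⟩
    rw [pvSlice_eval s (i : Int) (by omega) L, Int.toNat_natCast] at hf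
    have hiL : i + L ≤ s.length := by omega
    rw [PySem.Chars.isIn_iff_infix,
        pvInfix_iff _ big L hL (pvWindow_len s i L hiL)] at hf
    obtain ⟨j, hj, heq⟩ := hf
    exact ⟨i, j, hiL, hj, heq.symm⟩
  · rintro ⟨i, j, hi, hj, heq⟩
    refine ⟨i, by omega, ?_⟩
    rw [pvSlice_eval s (i : Int) (by omega) L, Int.toNat_natCast,
        PySem.Chars.isIn_iff_infix, pvInfix_iff _ big L hL (pvWindow_len s i L hi)]
    exact ⟨j, hj, heq.symm⟩

lemma pvAlt_iff (a b : List Char) (L : Nat) :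
    ((PySem.List.pyRange 0 ((b.length : Int) - (L : Int) + 1) 1).any
      (fun i => PySem.Set.contains
        (PySem.Set.ofList ((PySem.List.pyRange 0 ((a.length : Int) - (L : Int) + 1) 1).map
          (fun i => PySem.Chars.slice a (some i) (some (i + (L : Int))))))
        (PySem.Chars.slice b (some i) (some (i + (L : Int))))) = true)
    ↔ pvCommon a b L := by
  rw [pvAny_range]
  unfold pvCommon
  constructor
  · rintro ⟨j, hj, hf⟩
    rw [PySem.Set.contains_iff, PySem.Set.mem_ofList, List.mem_map] at hf
    obtain ⟨i, hmem, heq⟩ := hf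
    rw [PySem.List.mem_pyRange_one] at hmem
    rw [pvSlice_eval a i hmem.1 L] at heq
    rw [pvSlice_eval b (j : Int) (by omega) L, Int.toNat_natCast] at heq
    exact ⟨i.toNat, j, by omega, by omega, heq⟩
  · rintro ⟨i, j, hi, hj, heq⟩
    refine ⟨j, by omega, ?_⟩
    rw [PySem.Set.contains_iff, PySem.Set.mem_ofList, List.mem_map]
    refine ⟨(i : Int), by rw [PySem.List.mem_pyRange_one]; omega, ?_⟩
    rw [pvSlice_eval a (i : Int) (by omega) L, Int.toNat_natCast,
        pvSlice_eval b (j : Int) (by omega) L, Int.toNat_natCast]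
    exact heq

lemma pvCommon_symm (a b : List Char) (L : Nat) : pvCommon a b L ↔ pvCommon b a L := by
  unfold pvCommon
  constructor <;> rintro ⟨i, j, h1, h2, h3⟩ <;> exact ⟨j, i, h2, h1, h3.symm⟩

-- ===== VERDICT (by name: the statement is the Claim_ definition above) =====
theorem contains_significant_substring_py_spec : Claim_equal_contains_significant_substring_py := by
  intro s1 s2 _
  unfold Spec_contains_significant_substring_py
  unfold contains_significant_substring_py contains_significant_substring_py_alt
  set a := s1.toList
  set b := s2.toList
  set L : Nat := max 3 (min a.length b.length / 2) with hLdef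
  have hL : 0 < L := by omega
  rw [Bool.eq_iff_iff, Bool.or_eq_true, pvScanA_iff a b L hL, pvScanA_iff b a L hL,
      pvAlt_iff a b L, pvCommon_symm b a]
  tauto
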